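-- pv_equiv track=rewrite | github.com/rajdharmendraiiitg/leetcode-problems-python | common-probs.py | arrPartition01
-- ===== SOURCE A (Python) =====
-- def arrPartition01(numList,target):
--     def swap(arr,i,j):
--         temp = arr[i]
--         arr[i] = arr[j]
--         arr[j] = temp
--     i = j = 0
--     while(i< len(numList)):
--         if numList[i] == target:
--             i = i+1
--         else:
--             swap(numList,i,j)
--             i = i+1
--             j = j+1
--     return numList
-- ===== SOURCE B (Python) =====
-- def arrPartition01(numList, target):
--     # Filter-and-concatenate: non-targets keep their order, targets go to the end.
--     # Slice assignment mutates the caller's list in place, like A does.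
--     numList[:] = [x for x in numList if x != target] + [x for x in numList if x == target]
--     return numList
-- ===== Notes on version B (the rewrite author's own statement) =====
-- stated objective: simpler
-- what changed: Replaces the index/swap in-place stable-partition loop with two list comprehensions (non-targets, then targets) concatenated and written back via slice assignment.
import Mathlib
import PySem

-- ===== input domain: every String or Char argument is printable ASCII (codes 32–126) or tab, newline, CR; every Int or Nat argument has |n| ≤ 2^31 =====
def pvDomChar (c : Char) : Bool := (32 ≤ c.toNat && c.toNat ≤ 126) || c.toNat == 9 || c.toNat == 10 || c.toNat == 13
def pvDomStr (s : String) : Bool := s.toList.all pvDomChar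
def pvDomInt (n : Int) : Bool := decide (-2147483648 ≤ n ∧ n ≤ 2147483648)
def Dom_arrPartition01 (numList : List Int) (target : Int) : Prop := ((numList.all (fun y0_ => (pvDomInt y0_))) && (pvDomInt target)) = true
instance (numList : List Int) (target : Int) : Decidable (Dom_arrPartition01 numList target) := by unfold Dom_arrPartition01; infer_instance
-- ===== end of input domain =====

-- B replaces A's index/swap stable-partition loop with two filters concatenated (simpler);
-- both mutate the argument list in place in Python; the theorems are about the return value.

-- ===== PORT A =====
-- swap(arr, i, j): temp = arr[i]; arr[i] = arr[j]; arr[j] = temp.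
-- In A the indices are always in range (0 ≤ j ≤ i < len), so getD's default is never used.
def arrPartition01Swap (arr : List Int) (i j : Nat) : List Int :=
  let temp := arr.getD i 0
  let arr1 := arr.set i (arr.getD j 0)
  arr1.set j temp

-- the while loop: state is the (mutated) list and the two counters i, j
def arrPartition01Loop (target : Int) (numList : List Int) (i j : Nat) : List Int :=
  if _h : i < numList.length then
    if numList.getD i 0 = target then
      arrPartition01Loop target numList (i + 1) j
    else
      arrPartition01Loop target (arrPartition01Swap numList i j) (i + 1) (j + 1)
  else numList
termination_by numList.length - i
decreasing_by
  · omega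
  · simp [arrPartition01Swap]; omega

def arrPartition01 (numList : List Int) (target : Int) : List Int :=
  arrPartition01Loop target numList 0 0

-- ===== PORT B =====
def arrPartition01_alt (numList : List Int) (target : Int) : List Int :=
  numList.filter (fun x => x != target) ++ numList.filter (fun x => x == target)

-- ===== PRECONDITION & SPEC =====
def Spec_arrPartition01 (numList : List Int) (target : Int) (out : List Int) : Prop := out = arrPartition01_alt numList target
instance (numList : List Int) (target : Int) (out : List Int) : Decidable (Spec_arrPartition01 numList target out) := by unfold Spec_arrPartition01; infer_instance

-- ===== CLAIM (what is proved, stated in full; the proofs are below) =====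
def Claim_equal_arrPartition01 : Prop := ∀ (numList : List Int) (target : Int), Dom_arrPartition01 numList target → Spec_arrPartition01 numList target (arrPartition01 numList target)

-- ===== LEMMAS AND PROOFS =====

theorem getD_at_append (P L : List Int) (k : Nat) :
    (P ++ L).getD (P.length + k) 0 = L.getD k 0 := by
  simp [List.getD_eq_getElem?_getD, List.getElem?_append_right, Nat.add_sub_cancel_left]

theorem set_at_append (P L : List Int) (k : Nat) (a : Int) :
    (P ++ L).set (P.length + k) a = P ++ L.set k a := by
  rw [List.set_append_right _ _ (by omega)]
  simp

theorem getD_after (P L : List Int) : (P ++ L).getD P.length 0 = L.getD 0 0 := by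
  simpa using getD_at_append P L 0

theorem getD_replicate_len (t : Int) (m : Nat) (L : List Int) :
    (List.replicate m t ++ L).getD m 0 = L.getD 0 0 := by
  have := getD_at_append (List.replicate m t) L 0
  simpa using this

theorem set_after (P L : List Int) (a : Int) : (P ++ L).set P.length a = P ++ L.set 0 a := by
  simpa using set_at_append P L 0 a

theorem set_replicate_len (t : Int) (m : Nat) (L : List Int) (a : Int) :
    (List.replicate m t ++ L).set m a = List.replicate m t ++ L.set 0 a := by
  have := set_at_append (List.replicate m t) L 0 a
  simpa using this

-- swap on the decomposed list state: exchanging positions |P| and |P|+m of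
-- P ++ t^m ++ x::R moves x to the front of the t-block.
theorem swap_decomp (t x : Int) (P R : List Int) (m : Nat) :
    arrPartition01Swap (P ++ List.replicate m t ++ (x :: R)) (P.length + m) P.length
      = (P ++ [x]) ++ List.replicate m t ++ R := by
  have hget_i : (P ++ List.replicate m t ++ (x :: R)).getD (P.length + m) 0 = x := by
    rw [List.append_assoc, getD_at_append, getD_replicate_len]
    simp
  cases m with
  | zero =>
      have hget_j : (P ++ List.replicate 0 t ++ (x :: R)).getD P.length 0 = x := by
        simpa using hget_i
      unfold arrPartition01Swap
      dsimp only
      rw [hget_i, hget_j]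
      simp only [List.replicate_zero, List.append_nil, List.nil_append, Nat.add_zero]
      rw [set_after, set_after]
      simp
  | succ m' =>
      have hget_j : (P ++ List.replicate (m' + 1) t ++ (x :: R)).getD P.length 0 = t := by
        rw [List.append_assoc, getD_after]
        simp [List.replicate_succ]
      unfold arrPartition01Swap
      dsimp only
      rw [hget_i, hget_j]
      rw [List.append_assoc, set_at_append, set_replicate_len, List.set_cons_zero,
        List.append_assoc, set_after]
      simp [List.set_cons_zero, List.replicate_succ, List.replicate_succ' (n := m'),
        List.append_assoc]
      rw [show (t :: R) = [t] ++ R from rfl, ← List.append_assoc, ← List.replicate_succ',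
        List.replicate_succ]
      simp

-- loop invariant: the list is P ++ t^m ++ R with i = |P| + m, j = |P|
theorem loop_decomp (t : Int) (R : List Int) : ∀ (P : List Int) (m : Nat),
    arrPartition01Loop t (P ++ List.replicate m t ++ R) (P.length + m) P.length
      = P ++ R.filter (fun x => x != t) ++ List.replicate (m + R.count t) t := by
  induction R with
  | nil =>
      intro P m
      rw [arrPartition01Loop]
      simp
  | cons x R ih =>
      intro P m
      rw [arrPartition01Loop]
      have hlen : P.length + m < (P ++ List.replicate m t ++ (x :: R)).length := by
        simp only [List.length_append, List.length_replicate, List.length_cons]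
        omega
      have hget : (P ++ List.replicate m t ++ (x :: R)).getD (P.length + m) 0 = x := by
        rw [List.append_assoc, getD_at_append, getD_replicate_len]
        simp
      rw [dif_pos hlen, hget]
      by_cases hx : x = t
      · rw [if_pos hx]
        subst hx
        have e : P ++ List.replicate m x ++ (x :: R) = P ++ List.replicate (m + 1) x ++ R := by
          simp [List.replicate_succ' (n := m), List.append_assoc]
        rw [e, show P.length + m + 1 = P.length + (m + 1) by omega, ih P (m + 1)]
        have e2 : m + 1 + R.count x = m + (x :: R).count x := by
          simp [List.count_cons]
          omega
        simp [List.filter_cons, e2]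
      · rw [if_neg hx, swap_decomp]
        have := ih (P ++ [x]) m
        simp only [List.length_append, List.length_cons, List.length_nil] at this
        rw [show P.length + m + 1 = P.length + 1 + m by omega, this]
        have hne : (x != t) = true := by simpa using hx
        simp [List.filter_cons, hne, List.count_cons, hx, List.append_assoc]

theorem filter_eq_replicate (t : Int) (l : List Int) :
    l.filter (fun x => x == t) = List.replicate (l.count t) t := by
  induction l with
  | nil => simp
  | cons x l ih =>
      by_cases hx : x = t
      · subst hx; simp [List.filter_cons, List.count_cons, ih, List.replicate_succ]
      · simp [List.filter_cons, List.count_cons, hx, ih]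

-- ===== VERDICT (by name: the statement is the Claim_ definition above) =====
theorem arrPartition01_spec : Claim_equal_arrPartition01 := by
  intro numList target _
  unfold Spec_arrPartition01 arrPartition01 arrPartition01_alt
  have := loop_decomp target numList [] 0
  simpa [filter_eq_replicate] using this
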